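-- pv_equiv track=rewrite | github.com/GraphicDThanh/training-hub | backend/python/python/think-python-2/09-pr1-word-play/exercises/exercise7.py | contain_pairs_letter
-- ===== SOURCE A (Python) =====
-- def contain_pairs_letter(word):
--     """Check word contain couple pair word. For example: commttee
--
--         word: word need checking
--     """
--     previous = word[0]
--     count_pair = 0
--
--     for letter in word[1:]:
--         if previous == letter:
--             count_pair = count_pair + 1
--
--         previous = letter
--
--     if count_pair > 1:
--         return True
--     return False
-- ===== SOURCE B (Python) =====
-- def contain_pairs_letter(word):
--     """Check word contain couple pair word. For example: commttee
--
--         word: word need checking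
--     """
--     n = len(word)
--     runs = 0
--     i = 0
--     while i < n:
--         j = i + 1
--         while j < n and word[j] == word[i]:
--             j += 1
--         runs += 1
--         i = j
--     # total adjacent-equal pairs = length - number of maximal runs
--     return n - runs > 1
-- ===== Notes on version B (the rewrite author's own statement) =====
-- stated objective: alternative
-- what changed: B counts maximal runs of identical letters with a run-skipping scan and uses the identity adjacent-equal-pairs = len(word) - runs, instead of A's previous/current pairwise comparison with a pair counter.
-- crash fix: On the empty string A raises IndexError (word[0]); B returns False. — e.g. on contain_pairs_letter(""): A raises IndexError, B returns false
import Mathlib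
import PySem

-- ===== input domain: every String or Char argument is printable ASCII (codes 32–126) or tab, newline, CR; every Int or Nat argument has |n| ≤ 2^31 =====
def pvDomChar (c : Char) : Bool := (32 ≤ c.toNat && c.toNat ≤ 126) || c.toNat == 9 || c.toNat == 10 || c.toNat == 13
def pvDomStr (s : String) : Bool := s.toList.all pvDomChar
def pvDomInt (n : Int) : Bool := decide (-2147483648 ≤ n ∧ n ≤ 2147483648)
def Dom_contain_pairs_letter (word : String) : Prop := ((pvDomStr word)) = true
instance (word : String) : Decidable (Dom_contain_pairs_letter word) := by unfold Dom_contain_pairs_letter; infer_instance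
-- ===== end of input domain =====

-- B replaces A's previous/current pairwise pair-counter with a scan that counts maximal runs of
-- identical letters and uses the identity adjacent-equal pairs = length - runs (objective: alternative).
-- On the empty string A raises IndexError; Pre_ excludes it and B returns false there.

-- ===== PORT A =====
-- A: previous = word[0]; count pairs over word[1:] carrying (count_pair, previous); return count_pair > 1.
def contain_pairs_letter (word : String) : Bool :=
  match word.toList with
  | [] => false   -- unreachable inside Pre_: Python A raises IndexError on word[0]
  | previous :: rest =>
    let s := rest.foldl
      (fun (st : Nat × Char) letter =>
        (if st.2 == letter then st.1 + 1 else st.1, letter)) (0, previous)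
    decide (s.1 > 1)

-- ===== PORT B =====
-- Source B's run-counting scan: the inner while skips letters equal to the run's char (here: the
-- `x == c` branch continues the current run), the outer loop counts a run at each new char.
def pvRunsGo (c : Char) : List Char → Nat
  | [] => 0
  | x :: xs => if x == c then pvRunsGo c xs else 1 + pvRunsGo x xs

def pvRuns : List Char → Nat
  | [] => 0
  | c :: rest => 1 + pvRunsGo c rest

def contain_pairs_letter_alt (word : String) : Bool :=
  let l := word.toList
  decide (l.length - pvRuns l > 1)

-- ===== PRECONDITION & SPEC =====
-- Pre_ excludes exactly the empty string, on which A raises IndexError at word[0].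
def Pre_contain_pairs_letter (word : String) : Prop := word ≠ ""
instance (word : String) : Decidable (Pre_contain_pairs_letter word) := by
  unfold Pre_contain_pairs_letter; infer_instance

def pvWitness_contain_pairs_letter : String := "committee"

-- On the empty string A raises IndexError (word[0]); B returns False.
def Raises_contain_pairs_letter (word : String) : Prop := word = ""
instance (word : String) : Decidable (Raises_contain_pairs_letter word) := by
  unfold Raises_contain_pairs_letter; infer_instance
def pvRaiseWitness_contain_pairs_letter : String := ""
def pvRaiseWitnessOut_contain_pairs_letter : Bool := false

def Spec_contain_pairs_letter (word : String) (out : Bool) : Prop := out = contain_pairs_letter_alt word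
instance (word : String) (out : Bool) : Decidable (Spec_contain_pairs_letter word out) := by unfold Spec_contain_pairs_letter; infer_instance

-- ===== CLAIM (what is proved, stated in full; the proofs are below) =====
def Claim_equal_contain_pairs_letter : Prop := ∀ (word : String), Dom_contain_pairs_letter word → Pre_contain_pairs_letter word → Spec_contain_pairs_letter word (contain_pairs_letter word)

def Claim_raises_contain_pairs_letter : Prop := (∀ (word : String), Dom_contain_pairs_letter word → Raises_contain_pairs_letter word → ¬ Pre_contain_pairs_letter word) ∧ (Dom_contain_pairs_letter (pvRaiseWitness_contain_pairs_letter) ∧ Raises_contain_pairs_letter (pvRaiseWitness_contain_pairs_letter) ∧ contain_pairs_letter_alt (pvRaiseWitness_contain_pairs_letter) = pvRaiseWitnessOut_contain_pairs_letter)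

-- ===== LEMMAS AND PROOFS =====

-- recursive form of A's pair counter (prev is the `previous` variable)
def pvPairs (prev : Char) : List Char → Nat
  | [] => 0
  | x :: xs => (if prev == x then 1 else 0) + pvPairs x xs

theorem pvFoldl_pairs (l : List Char) (prev : Char) (n : Nat) :
    (l.foldl (fun (st : Nat × Char) letter =>
        (if st.2 == letter then st.1 + 1 else st.1, letter)) (n, prev)).1
      = n + pvPairs prev l := by
  induction l generalizing prev n with
  | nil => simp [pvPairs]
  | cons x xs ih =>
    simp only [List.foldl_cons]
    rw [ih]
    by_cases h : prev == x <;> simp [pvPairs, h] <;> omega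

-- the identity behind B: adjacent-equal pairs + runs-of-the-rest = length of the rest
theorem pvPairs_add_runsGo (l : List Char) (c : Char) :
    pvPairs c l + pvRunsGo c l = l.length := by
  induction l generalizing c with
  | nil => simp [pvPairs, pvRunsGo]
  | cons x xs ih =>
    have hih := ih x
    simp only [pvPairs, pvRunsGo, beq_iff_eq]
    by_cases h : x = c
    · subst h; simp; omega
    · have h2 : ¬ (c = x) := fun e => h e.symm
      simp [h, h2]; omega

-- ===== VERDICT (by name: the statement is the Claim_ definition above) =====
theorem contain_pairs_letter_spec : Claim_equal_contain_pairs_letter := by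
  intro word _ hpre
  unfold Spec_contain_pairs_letter contain_pairs_letter contain_pairs_letter_alt
  cases hl : word.toList with
  | nil =>
    exact absurd (String.toList_eq_nil_iff.mp hl) hpre
  | cons p rest =>
    simp only [pvFoldl_pairs, pvRuns, List.length_cons, Nat.zero_add]
    have h := pvPairs_add_runsGo rest p
    rw [decide_eq_decide]
    omega

@[simp] theorem contain_pairs_letter_raises : Claim_raises_contain_pairs_letter := by
  unfold Claim_raises_contain_pairs_letter
  refine ⟨fun w _ hr => ?_, by decide⟩
  simp [Pre_contain_pairs_letter, Raises_contain_pairs_letter] at hr ⊢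
  exact hr
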